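-- pv_equiv track=rewrite | github.com/tnakaicode/jburkardt-python | subset/derange0_check.py | derange0_check
-- ===== SOURCE A (Python) =====
-- def derange0_check(n, a):
--
--     # *****************************************************************************80
--     #
--     # % DERANGE0_CHECK checks if a vector is a derangement of ( 0, ..., N-1 ).
--     #
--     #  Discussion:
--     #
--     #    A derangement of N objects is a permutation which leaves no object
--     #    unchanged.
--     #
--     #    A derangement of N objects is a permutation with no fixed
--     #    points.  If we symbolize the permutation operation by "P",
--     #    then for a derangment, P(I) is never equal to I.
--     #
--     #    The number of derangements of N objects is sometimes called
--     #    the subfactorial function, or the derangement number D(N).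
--     #
--     #  Licensing:
--     #
--     #    This code is distributed under the GNU LGPL license.
--     #
--     #  Modified:
--     #
--     #    02 June 2015
--     #
--     #  Author:
--     #
--     #    John Burkardt
--     #
--     #  Parameters:
--     #
--     #    Input, integer N, the number of objects permuted.
--     #
--     #    Input, integer A(N), a permutation.
--     #
--     #    Output, logical CHECK, is TRUE if A is a derangement, and
--     #    FALSE otherwise.
--     #
--
--     #
--     #  Values must be between 0 and N - 1
--     #
--     for i in range(0, n):
--         if (a[i] < 0 or n - 1 < a[i]):
--             check = False
--             return check
-- #
-- #  Every value must be represented.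
-- #
--     for j in range(0, n):
--         check = False
--         for i in range(0, n):
--             if (a[i] == j):
--                 check = True
--                 break
--         if (not check):
--             return check
-- #
-- #  Values must be deranged.
-- #
--     for i in range(0, n):
--         if (a[i] == i):
--             check = False
--             return check
--
--     check = True
--
--     return check
-- ===== SOURCE B (Python) =====
-- def derange0_check(n, a):
--     # Single pass with a seen-set: in-range values with no duplicates over n
--     # slots are all present by pigeonhole, so no separate presence scan is needed.
--     seen = set()
--     for i in range(n):
--         v = a[i]
--         if v < 0 or n - 1 < v:
--             return False
--         if v in seen:
--             return False
--         seen.add(v)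
--         if v == i:
--             return False
--     return True
-- ===== Notes on version B (the rewrite author's own statement) =====
-- stated objective: alternative
-- what changed: Folds A's three separate passes (range check, nested every-value-present scan, fixed-point pass) into one single loop maintaining a seen-set: in-range values with no duplicates over n slots are all present by pigeonhole, so the presence scan disappears.
import Mathlib
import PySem

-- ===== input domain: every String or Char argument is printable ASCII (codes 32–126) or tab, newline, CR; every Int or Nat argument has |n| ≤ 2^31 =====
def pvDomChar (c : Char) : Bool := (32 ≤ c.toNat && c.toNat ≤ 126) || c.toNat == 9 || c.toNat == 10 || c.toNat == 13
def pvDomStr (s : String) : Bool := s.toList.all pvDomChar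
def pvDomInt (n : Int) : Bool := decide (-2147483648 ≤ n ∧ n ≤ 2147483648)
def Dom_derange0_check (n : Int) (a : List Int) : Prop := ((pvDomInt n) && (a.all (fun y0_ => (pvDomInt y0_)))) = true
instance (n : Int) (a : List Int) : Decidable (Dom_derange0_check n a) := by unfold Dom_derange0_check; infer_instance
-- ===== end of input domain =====

-- B folds A's three passes into one loop over a seen-set (pigeonhole replaces the presence scan).

-- ===== PORT A =====
-- A's loops 'for i in range(0, n): if cond: return/break' are ported as counter recursion
-- with early exit (Python's range is lazy; the loop stops at the first hit).
-- a[i] is PySem.List.pyGetD (in range under Pre_; Pre_ admits only inputs without IndexError).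
def dcAnyUp (n : Int) (f : Int → Bool) (i : Int) : Bool :=
  if _h : i < n then
    if f i then true else dcAnyUp n f (i + 1)
  else false
termination_by (n - i).toNat
decreasing_by omega

def derange0_check (n : Int) (a : List Int) : Bool :=
  -- Values must be between 0 and N - 1
  if dcAnyUp n (fun i =>
       let ai := PySem.List.pyGetD a i 0
       ai < 0 || n - 1 < ai) 0 then false
  -- Every value must be represented (inner linear scan with break)
  else if dcAnyUp n (fun j =>
       ! dcAnyUp n (fun i => PySem.List.pyGetD a i 0 == j) 0) 0 then false
  -- Values must be deranged
  else if dcAnyUp n (fun i => PySem.List.pyGetD a i 0 == i) 0 then false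
  else true

-- ===== PORT B =====
-- B's single loop: counter recursion carrying the seen-set; early returns stop the recursion.
def dcAltGo (n : Int) (a : List Int) (i : Int) (seen : PySem.Set Int) : Bool :=
  if _h : i < n then
    let v := PySem.List.pyGetD a i 0
    if v < 0 || n - 1 < v then false
    else if PySem.Set.contains seen v then false
    else if v == i then false
    else dcAltGo n a (i + 1) (PySem.Set.add seen v)
  else true
termination_by (n - i).toNat
decreasing_by omega

def derange0_check_alt (n : Int) (a : List Int) : Bool :=
  dcAltGo n a 0 PySem.Set.empty

-- ===== PRECONDITION & SPEC =====
-- Exactly the inputs where Python A returns: either n ≤ len(a), or (n > len(a) and) some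
-- entry of a is out of [0, n-1], so A's first loop returns False before a[i] hits IndexError.
def Pre_derange0_check (n : Int) (a : List Int) : Prop :=
  n ≤ (a.length : Int) ∨ ∃ v ∈ a, v < 0 ∨ n - 1 < v
instance (n : Int) (a : List Int) : Decidable (Pre_derange0_check n a) := by unfold Pre_derange0_check; infer_instance
def pvWitness_derange0_check : Int × List Int := (3, [1, 2, 0])

def Spec_derange0_check (n : Int) (a : List Int) (out : Bool) : Prop := out = derange0_check_alt n a
instance (n : Int) (a : List Int) (out : Bool) : Decidable (Spec_derange0_check n a out) := by unfold Spec_derange0_check; infer_instance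

-- ===== CLAIM (what is proved, stated in full; the proofs are below) =====
def Claim_equal_derange0_check : Prop := ∀ (n : Int) (a : List Int), Dom_derange0_check n a → Pre_derange0_check n a → Spec_derange0_check n a (derange0_check n a)

-- ===== LEMMAS AND PROOFS =====

-- the counter recursion is the short-circuit any over range(i, n)
lemma dcAnyUp_eq_any (n : Int) (f : Int → Bool) : ∀ (k : Nat) (i : Int), (n - i).toNat = k →
    dcAnyUp n f i = (PySem.List.pyRange i n 1).any f := by
  intro k
  induction k with
  | zero =>
      intro i hk
      rw [dcAnyUp]
      rw [dif_neg (by omega), PySem.List.pyRange_one_eq_nil (by omega)]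
      simp
  | succ k ih =>
      intro i hk
      rw [dcAnyUp]
      rw [dif_pos (by omega), PySem.List.pyRange_one_cons (by omega)]
      by_cases hf : f i = true
      · simp [hf]
      · simp only [List.any_cons, hf, Bool.false_or]
        exact ih (i + 1) (by omega)

-- characterisation of A's result
lemma derange0_check_true_iff (n : Int) (a : List Int) :
    derange0_check n a = true ↔
      (∀ i ∈ PySem.List.pyRange 0 n 1,
          ¬ (PySem.List.pyGetD a i 0 < 0 ∨ n - 1 < PySem.List.pyGetD a i 0)) ∧
      (∀ j ∈ PySem.List.pyRange 0 n 1,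
          ∃ i ∈ PySem.List.pyRange 0 n 1, PySem.List.pyGetD a i 0 = j) ∧
      (∀ i ∈ PySem.List.pyRange 0 n 1, PySem.List.pyGetD a i 0 ≠ i) := by
  unfold derange0_check
  simp only [dcAnyUp_eq_any n _ (n - 0).toNat _ rfl]
  split_ifs with h1 h2 h3 <;> simp_all [List.any_eq_true, not_or]
  all_goals first
  | (intro hin hsurj
     obtain ⟨x, ⟨hx0, hxn⟩, hbad⟩ := h1
     exact absurd (hin x hx0 hxn) (by omega))
  | (intro hsurj
     obtain ⟨x, ⟨hx0, hxn⟩, hnone⟩ := h2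
     obtain ⟨i, ⟨hi0, hin'⟩, hval⟩ := hsurj x hx0 hxn
     exact absurd hval (hnone i hi0 hin'))
  | (intro _hs
     obtain ⟨x, ⟨hx0, hxn⟩, hv⟩ := h3
     exact ⟨x, hx0, hxn, hv⟩)
  | (intro j hj0 hjn
     obtain ⟨i, hi0, hin', hv⟩ := h2 j hj0 hjn
     exact ⟨i, ⟨hi0, hin'⟩, hv⟩)

-- characterisation of B's loop
lemma dcAltGo_true_iff (n : Int) (a : List Int) : ∀ (k : Nat) (i : Int) (s : PySem.Set Int),
    (n - i).toNat = k →
    (dcAltGo n a i s = true ↔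
      (∀ i' ∈ PySem.List.pyRange i n 1,
          ¬ PySem.List.pyGetD a i' 0 < 0 ∧ ¬ n - 1 < PySem.List.pyGetD a i' 0 ∧
            PySem.List.pyGetD a i' 0 ∉ s ∧ PySem.List.pyGetD a i' 0 ≠ i') ∧
      ((PySem.List.pyRange i n 1).map (fun i' => PySem.List.pyGetD a i' 0)).Nodup) := by
  intro k
  induction k with
  | zero =>
      intro i s hk
      rw [dcAltGo]
      rw [dif_neg (by omega), PySem.List.pyRange_one_eq_nil (by omega)]
      simp
  | succ k ih =>
      intro i s hk
      rw [dcAltGo]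
      rw [dif_pos (by omega), PySem.List.pyRange_one_cons (by omega)]
      simp only [List.map_cons, List.nodup_cons, List.mem_cons, List.mem_map]
      split_ifs with h1 h2 h3
      · simp only [Bool.or_eq_true, decide_eq_true_eq] at h1
        refine iff_of_false (by simp) ?_
        intro hc
        have := hc.1 i (Or.inl rfl)
        tauto
      · rw [PySem.Set.contains_iff] at h2
        refine iff_of_false (by simp) ?_
        intro hc
        exact (hc.1 i (Or.inl rfl)).2.2.1 h2
      · simp only [beq_iff_eq] at h3
        refine iff_of_false (by simp) ?_
        intro hc
        exact (hc.1 i (Or.inl rfl)).2.2.2 h3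
      · simp only [Bool.or_eq_true, decide_eq_true_eq, not_or] at h1
        rw [PySem.Set.contains_iff] at h2
        simp only [beq_iff_eq] at h3
        rw [ih (i + 1) (PySem.Set.add s (PySem.List.pyGetD a i 0)) (by omega)]
        simp only [PySem.Set.mem_add, not_or, not_exists]
        constructor
        · rintro ⟨hrest, hnd⟩
          refine ⟨fun i' hi' => ?_, fun x hx => ?_, hnd⟩
          · rcases hi' with rfl | hi'
            · exact ⟨h1.1, h1.2, h2, h3⟩
            · have := hrest i' hi'
              exact ⟨this.1, this.2.1, this.2.2.1.1, this.2.2.2⟩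
          · exact (hrest x hx.1).2.2.1.2 hx.2
        · rintro ⟨hall, hni, hnd⟩
          refine ⟨fun i' hi' => ?_, hnd⟩
          have := hall i' (Or.inr hi')
          exact ⟨this.1, this.2.1, ⟨this.2.2.1, fun hval => hni i' ⟨hi', hval⟩⟩, this.2.2.2⟩

-- pigeonhole on lists: same length, no escape ⇒ nodup ↔ surjective
lemma nodup_iff_forall_mem {L R : List Int} (hR : R.Nodup) (hlen : L.length = R.length)
    (hsub : ∀ v ∈ L, v ∈ R) : L.Nodup ↔ ∀ j ∈ R, j ∈ L := by
  have hsubF : L.toFinset ⊆ R.toFinset := by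
    intro x hx; simp only [List.mem_toFinset] at *; exact hsub x hx
  have hcardR : R.toFinset.card = R.length := List.toFinset_card_of_nodup hR
  constructor
  · intro hnd j hj
    have hcardL : L.toFinset.card = L.length := List.toFinset_card_of_nodup hnd
    have : L.toFinset = R.toFinset :=
      Finset.eq_of_subset_of_card_le hsubF (by omega)
    have := this ▸ (List.mem_toFinset.mpr hj)
    exact List.mem_toFinset.mp this
  · intro hsurj
    have hsupF : R.toFinset ⊆ L.toFinset := by
      intro x hx; simp only [List.mem_toFinset] at *; exact hsurj x hx
    have heq : L.toFinset = R.toFinset := Finset.Subset.antisymm hsubF hsupF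
    have : L.toFinset.card = L.length := by
      have hle : L.toFinset.card ≤ L.length := List.toFinset_card_le L
      rw [heq, hcardR]; omega
    exact Multiset.toFinset_card_eq_card_iff_nodup.mp this

-- ===== VERDICT (by name: the statement is the Claim_ definition above) =====
theorem derange0_check_spec : Claim_equal_derange0_check := by
  intro n a _ _
  unfold Spec_derange0_check derange0_check_alt
  have hA := derange0_check_true_iff n a
  have hB := dcAltGo_true_iff n a (n - 0).toNat 0 PySem.Set.empty rfl
  rw [Bool.eq_iff_iff, hA, hB]
  constructor
  · rintro ⟨hin, hsurj, hfix⟩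
    have hsub : ∀ v ∈ (PySem.List.pyRange 0 n 1).map (fun i => PySem.List.pyGetD a i 0), v ∈ PySem.List.pyRange 0 n 1 := by
      rintro v hv
      rcases List.mem_map.mp hv with ⟨i, hi, rfl⟩
      have := hin i hi
      rw [PySem.List.mem_pyRange_one]
      omega
    refine ⟨fun i hi => ?_, ?_⟩
    · have h1 := hin i hi
      have h3 := hfix i hi
      exact ⟨fun h => h1 (Or.inl h), fun h => h1 (Or.inr h), by simp [PySem.Set.empty], h3⟩
    · rw [nodup_iff_forall_mem (PySem.List.nodup_pyRange_one 0 n) (by simp) hsub]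
      intro j hj
      rcases hsurj j hj with ⟨i, hi, hval⟩
      exact List.mem_map.mpr ⟨i, hi, hval⟩
  · rintro ⟨hall, hnd⟩
    have hsub : ∀ v ∈ (PySem.List.pyRange 0 n 1).map (fun i => PySem.List.pyGetD a i 0), v ∈ PySem.List.pyRange 0 n 1 := by
      rintro v hv
      rcases List.mem_map.mp hv with ⟨i, hi, rfl⟩
      have := hall i hi
      rw [PySem.List.mem_pyRange_one]
      omega
    refine ⟨fun i hi => ?_, fun j hj => ?_, fun i hi => (hall i hi).2.2.2⟩
    · have := hall i hi; tauto
    · have := (nodup_iff_forall_mem (PySem.List.nodup_pyRange_one 0 n) (by simp) hsub).mp hnd j hj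
      rcases List.mem_map.mp this with ⟨i, hi, hval⟩
      exact ⟨i, hi, hval⟩
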